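-- pv_equiv track=rewrite | github.com/JOHNNY-fans/KG-o1 | src/Logical_Triplets_Generation/data_utils.py | find_leaf_nodes
-- ===== SOURCE A (Python) =====
-- from collections import Counter
--
-- def find_leaf_nodes(triples):
--     all_entities = []
--     for triple in triples:
--         subject, _, obj = triple
--         all_entities.append(subject if not isinstance(subject, list) else tuple(subject))
--         all_entities.append(obj if not isinstance(obj, list) else tuple(obj))
--     entity_counter = Counter(all_entities)
--     return [e if not isinstance(e, tuple) else list(e) for e, count in entity_counter.items() if count == 1]
-- ===== SOURCE B (Python) =====
-- def find_leaf_nodes(triples):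
--     # One pass: track multiplicity classes with two sets instead of a Counter histogram.
--     once = set()
--     multi = set()
--     order = []
--     for triple in triples:
--         subject, _, obj = triple
--         for e in (subject if not isinstance(subject, list) else tuple(subject),
--                   obj if not isinstance(obj, list) else tuple(obj)):
--             if e not in once and e not in multi:
--                 once.add(e)
--                 order.append(e)
--             elif e in once:
--                 once.discard(e)
--                 multi.add(e)
--             # already in multi: nothing to do
--     return [list(e) if isinstance(e, tuple) else e for e in order if e in once]
-- ===== Notes on version B (the rewrite author's own statement) =====
-- stated objective: alternative
-- what changed: B replaces A's build-full-entity-list-then-Counter-then-items-scan with a single pass that classifies each entity into 'seen once'/'seen more' sets while recording first-occurrence order, then filters the order list by the once-set.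
import Mathlib
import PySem

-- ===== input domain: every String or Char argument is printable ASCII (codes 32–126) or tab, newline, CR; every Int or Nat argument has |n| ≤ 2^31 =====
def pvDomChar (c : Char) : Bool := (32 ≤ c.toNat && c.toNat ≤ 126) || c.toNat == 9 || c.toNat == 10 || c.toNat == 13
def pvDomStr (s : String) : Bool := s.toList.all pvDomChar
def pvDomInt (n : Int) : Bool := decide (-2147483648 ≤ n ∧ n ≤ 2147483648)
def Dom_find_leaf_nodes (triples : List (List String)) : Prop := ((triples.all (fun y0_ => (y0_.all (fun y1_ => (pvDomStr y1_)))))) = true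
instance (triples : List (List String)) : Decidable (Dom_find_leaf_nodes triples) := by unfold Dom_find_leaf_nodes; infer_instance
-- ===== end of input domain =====

-- B makes a single pass keeping two multiplicity-class sets and a first-occurrence order list,
-- instead of A's full entity list + Counter + items scan (objective: alternative, same asymptotic cost).
-- Entities here are strings (elements of List String), so A's isinstance(..., list)/tuple coercion
-- branches never fire and are ported as the identity.

-- ===== PORT A =====
-- 'subject, _, obj = triple' is t[0] and t[2]; exact under Pre_ (every triple has length 3),
-- ported with headD/getD which coincide with Python indexing on length-3 lists.
def find_leaf_nodes (triples : List (List String)) : List String :=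
  let all_entities : List String :=
    triples.foldl (fun acc t => acc ++ [t.headD "", t.getD 2 ""]) []
  let entity_counter : PySem.Dict String Int := PySem.Dict.counter all_entities
  (entity_counter.items.filter (fun p => p.2 == 1)).map (fun p => p.1)

-- ===== PORT B =====
-- per-entity step of Source B's loop body (state = (once, multi, order))
def pvStep (st : PySem.Set String × PySem.Set String × List String) (e : String) :
    PySem.Set String × PySem.Set String × List String :=
  if !st.1.contains e && !st.2.1.contains e then
    (st.1.add e, st.2.1, st.2.2 ++ [e])
  else if st.1.contains e then
    (st.1.discard e, st.2.1.add e, st.2.2)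
  else st

def find_leaf_nodes_alt (triples : List (List String)) : List String :=
  let st := triples.foldl (fun st t => pvStep (pvStep st (t.headD "")) (t.getD 2 ""))
    (PySem.Set.empty, PySem.Set.empty, ([] : List String))
  st.2.2.filter (fun e => st.1.contains e)

-- ===== PRECONDITION & SPEC =====
-- Pre_ excludes triples of length ≠ 3, on which Python's unpacking 'subject, _, obj = triple' raises ValueError.
def Pre_find_leaf_nodes (triples : List (List String)) : Prop :=
  ∀ t ∈ triples, t.length = 3
instance (triples : List (List String)) : Decidable (Pre_find_leaf_nodes triples) := by
  unfold Pre_find_leaf_nodes; infer_instance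
def pvWitness_find_leaf_nodes : List (List String) :=
  [["a", "r", "b"], ["b", "s", "c"], ["a", "t", "c"]]

def Spec_find_leaf_nodes (triples : List (List String)) (out : List String) : Prop :=
  out = find_leaf_nodes_alt triples
instance (triples : List (List String)) (out : List String) : Decidable (Spec_find_leaf_nodes triples out) := by
  unfold Spec_find_leaf_nodes; infer_instance

-- ===== CLAIM (what is proved, stated in full; the proofs are below) =====
def Claim_equal_find_leaf_nodes : Prop := ∀ (triples : List (List String)), Dom_find_leaf_nodes triples → Pre_find_leaf_nodes triples → Spec_find_leaf_nodes triples (find_leaf_nodes triples)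

-- ===== LEMMAS AND PROOFS =====

-- the entity stream both programs process, in order
def pvEnts (triples : List (List String)) : List String :=
  triples.flatMap (fun t => [t.headD "", t.getD 2 ""])

-- B's per-triple double step over triples is the per-entity step over the entity stream
lemma pvFold_pairs (triples : List (List String))
    (st : PySem.Set String × PySem.Set String × List String) :
    triples.foldl (fun st t => pvStep (pvStep st (t.headD "")) (t.getD 2 "")) st
      = (pvEnts triples).foldl pvStep st := by
  induction triples generalizing st with
  | nil => rfl
  | cons t ts ih =>
    simp only [pvEnts, List.flatMap_cons, List.foldl_cons, List.foldl_append] at ih ⊢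
    exact ih _

-- loop invariant of B's pass over any entity stream l:
-- order is the ordered dedup of l, once holds exactly the count-1 entities, multi the count-≥2 ones
lemma pvInv (l : List String) :
    (l.foldl pvStep (PySem.Set.empty, PySem.Set.empty, ([] : List String))).2.2
        = PySem.Set.ofList l
    ∧ (∀ x, x ∈ (l.foldl pvStep (PySem.Set.empty, PySem.Set.empty, ([] : List String))).1
        ↔ l.count x = 1)
    ∧ (∀ x, x ∈ (l.foldl pvStep (PySem.Set.empty, PySem.Set.empty, ([] : List String))).2.1
        ↔ 2 ≤ l.count x) := by
  induction l using List.reverseRecOn with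
  | nil =>
    refine ⟨rfl, ?_, ?_⟩ <;> intro x <;> simp [PySem.Set.empty]
  | append_singleton l e ih =>
    obtain ⟨horder, honce, hmulti⟩ := ih
    rw [List.foldl_append]
    set st := l.foldl pvStep (PySem.Set.empty, PySem.Set.empty, ([] : List String)) with hst
    have hcontains : ∀ (s : PySem.Set String) (x : String), s.contains x = decide (x ∈ s) := by
      intro s x
      simp [PySem.Set.contains_eq_listContains]
    have h1 : st.1.contains e = decide (l.count e = 1) := by
      rw [hcontains]; simp [honce]
    have h2 : st.2.1.contains e = decide (2 ≤ l.count e) := by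
      rw [hcontains]; simp [hmulti]
    rcases Nat.lt_or_ge (l.count e) 2 with hlt | hge
    · rcases Nat.lt_or_ge (l.count e) 1 with hlt0 | hge1
      · -- count 0: first branch, a fresh entity
        have h0 : l.count e = 0 := by omega
        have hnotmem : e ∉ l := by rwa [← List.count_eq_zero]
        simp only [List.foldl_cons, List.foldl_nil, pvStep, h1, h2, h0]
        norm_num
        refine ⟨?_, ?_, ?_⟩
        · rw [PySem.Set.ofList_append_singleton, PySem.Set.add, ← horder]
          have hne : e ∉ st.2.2 := by rw [horder]; simp [PySem.Set.mem_ofList, hnotmem]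
          simp [hne]
        · intro x
          rw [honce]
          rcases eq_or_ne x e with hx | hx
          · subst hx; simp [h0]
          · simp [hx, Ne.symm hx]
        · intro x
          rw [hmulti]
          rcases eq_or_ne x e with hx | hx
          · subst hx; simp [h0]
          · simp [hx, Ne.symm hx]
      · -- count 1: second branch, once → multi
        have h0 : l.count e = 1 := by omega
        have hmem : e ∈ l := List.count_pos_iff.mp (by omega)
        simp only [List.foldl_cons, List.foldl_nil, pvStep, h1, h2, h0]
        norm_num
        refine ⟨?_, ?_, ?_⟩
        · rw [PySem.Set.ofList_append_singleton, PySem.Set.add, ← horder]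
          have hme : e ∈ st.2.2 := by rw [horder]; simp [PySem.Set.mem_ofList, hmem]
          simp [hme]
        · intro x
          rw [honce]
          rcases eq_or_ne x e with hx | hx
          · subst hx; simp [h0]
          · simp [hx, Ne.symm hx]
        · intro x
          rw [hmulti]
          rcases eq_or_ne x e with hx | hx
          · subst hx; simp [h0]
          · simp [hx, Ne.symm hx]
    · -- count ≥ 2: third branch, nothing changes
      have hmem : e ∈ l := List.count_pos_iff.mp (by omega)
      have h1' : st.1.contains e = false := by rw [h1]; simp; omega
      have h2' : st.2.1.contains e = true := by rw [h2]; simp; omega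
      simp only [List.foldl_cons, List.foldl_nil, pvStep, h1', h2']
      norm_num
      refine ⟨?_, ?_, ?_⟩
      · rw [PySem.Set.ofList_append_singleton, PySem.Set.add, ← horder]
        have hme : e ∈ st.2.2 := by rw [horder]; simp [PySem.Set.mem_ofList, hmem]
        simp [hme]
      · intro x
        rw [honce]
        rcases eq_or_ne x e with hx | hx
        · subst hx; simp only [List.count_append, List.count_singleton]; omega
        · simp [hx, Ne.symm hx]
      · intro x
        rw [hmulti]
        rcases eq_or_ne x e with hx | hx
        · subst hx; simp only [List.count_append, List.count_singleton]; omega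
        · simp [hx, Ne.symm hx]

-- ===== VERDICT (by name: the statement is the Claim_ definition above) =====
theorem find_leaf_nodes_spec : Claim_equal_find_leaf_nodes := by
  intro triples _ _
  unfold Spec_find_leaf_nodes
  obtain ⟨horder, honce, hmulti⟩ := pvInv (pvEnts triples)
  have hA : find_leaf_nodes triples
      = ((PySem.Dict.counter (pvEnts triples)).items.filter (fun p => p.2 == 1)).map
          (fun p => p.1) := by
    unfold find_leaf_nodes pvEnts
    simp only [PySem.List.foldl_append_eq_flatMap, List.nil_append]
  have hB : find_leaf_nodes_alt triples
      = ((pvEnts triples).foldl pvStep (PySem.Set.empty, PySem.Set.empty, ([] : List String))).2.2.filter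
          (fun e => ((pvEnts triples).foldl pvStep (PySem.Set.empty, PySem.Set.empty, ([] : List String))).1.contains e) := by
    unfold find_leaf_nodes_alt
    simp only [pvFold_pairs]
  rw [hA, hB, horder, PySem.Dict.items_counter, List.filter_map, List.map_map]
  have hfun : ((fun (p : String × Int) => p.1) ∘ fun k => (k, ((pvEnts triples).count k : Int)))
      = fun k => k := rfl
  rw [hfun, List.map_id']
  have hcontains : ∀ (s : PySem.Set String) (y : String), s.contains y = decide (y ∈ s) := by
    intro s y; simp [PySem.Set.contains_eq_listContains]
  apply List.filter_congr
  intro x _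
  simp only [Function.comp]
  rw [hcontains]
  by_cases hx : (pvEnts triples).count x = 1
  · rw [decide_eq_true ((honce x).mpr hx), hx]
    norm_num
  · rw [decide_eq_false (fun hm => hx ((honce x).mp hm))]
    simp [hx]
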